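-- pv_equiv track=rewrite | github.com/joowhan/Translation_Project | src_old/beta_utils_mod_01.py | rememberSpace
-- ===== SOURCE A (Python) =====
-- def rememberSpace(lis, input):
--
--     rlis = []
--
--     for i in range(len(lis)):
--         if lis[i]==input:
--             rlis.append(i)
--
--     for i in range(len(rlis)):
--         rlis[i] = rlis[i]-i
--     return rlis
-- ===== SOURCE B (Python) =====
-- def rememberSpace(lis, input):
--     nonmatches = 0
--     rlis = []
--     for x in lis:
--         if x == input:
--             rlis.append(nonmatches)
--         else:
--             nonmatches += 1
--     return rlis
-- ===== Notes on version B (the rewrite author's own statement) =====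
-- stated objective: simpler
-- what changed: Single pass over the elements maintaining a count of non-matching elements seen so far, appending that count at each match; no index collection and no second adjustment pass (each answer p_k - k equals the number of preceding non-matches).
import Mathlib
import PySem

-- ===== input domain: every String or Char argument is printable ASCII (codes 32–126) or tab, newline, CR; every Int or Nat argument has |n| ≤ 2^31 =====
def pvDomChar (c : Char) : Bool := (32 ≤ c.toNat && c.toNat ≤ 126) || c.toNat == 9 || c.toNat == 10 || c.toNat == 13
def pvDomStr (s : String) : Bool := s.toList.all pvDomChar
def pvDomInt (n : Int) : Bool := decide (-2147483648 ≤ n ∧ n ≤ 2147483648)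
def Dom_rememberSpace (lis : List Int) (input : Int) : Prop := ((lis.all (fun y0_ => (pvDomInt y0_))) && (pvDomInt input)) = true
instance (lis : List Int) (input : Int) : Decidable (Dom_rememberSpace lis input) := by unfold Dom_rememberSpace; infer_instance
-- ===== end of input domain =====

-- B replaces A's two passes (collect match indices, then subtract each index's rank) with one
-- pass that counts non-matches and appends that count at each match; objective: simpler.


-- ===== PORT A =====
def rememberSpace (lis : List Int) (input : Int) : List Int :=
  -- first loop: collect indices i with lis[i] == input
  let rlis : List Int := (List.range lis.length).foldl
    (fun r i => if lis.getD i 0 = input then r ++ [(i : Int)] else r) []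
  -- second loop: in-place rlis[i] = rlis[i] - i
  (List.range rlis.length).foldl (fun r i => r.set i (r.getD i 0 - (i : Int))) rlis

-- ===== PORT B =====
def rememberSpace_alt (lis : List Int) (input : Int) : List Int :=
  (lis.foldl
    (fun (st : Int × List Int) x =>
      if x = input then (st.1, st.2 ++ [st.1]) else (st.1 + 1, st.2))
    (0, [])).2

-- ===== PRECONDITION & SPEC =====
def Spec_rememberSpace (lis : List Int) (input : Int) (out : List Int) : Prop := out = rememberSpace_alt lis input
instance (lis : List Int) (input : Int) (out : List Int) : Decidable (Spec_rememberSpace lis input out) := by unfold Spec_rememberSpace; infer_instance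

-- ===== CLAIM (what is proved, stated in full; the proofs are below) =====
def Claim_equal_rememberSpace : Prop := ∀ (lis : List Int) (input : Int), Dom_rememberSpace lis input → Spec_rememberSpace lis input (rememberSpace lis input)

-- ===== LEMMAS AND PROOFS =====

-- reference function: c = non-matches seen so far
def pvF (input : Int) : List Int → Int → List Int
  | [], _ => []
  | x :: xs, c => if x = input then c :: pvF input xs c else pvF input xs (c + 1)

-- match indices of l, absolute index starting at s
def pvIdxs (input : Int) : List Int → Nat → List Int
  | [], _ => []
  | x :: xs, s => if x = input then (s : Int) :: pvIdxs input xs (s + 1) else pvIdxs input xs (s + 1)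

-- adjusted list: subtract position (starting at k) from each element
def pvAdj : List Int → Nat → List Int
  | [], _ => []
  | x :: xs, k => (x - (k : Int)) :: pvAdj xs (k + 1)

theorem pvB_foldl (input : Int) : ∀ (l : List Int) (c : Int) (acc : List Int),
    (l.foldl (fun (st : Int × List Int) x =>
      if x = input then (st.1, st.2 ++ [st.1]) else (st.1 + 1, st.2)) (c, acc)).2
    = acc ++ pvF input l c := by
  intro l
  induction l with
  | nil => simp [pvF]
  | cons x xs ih =>
    intro c acc
    by_cases h : x = input <;> simp [pvF, h, ih]

theorem pvA_loop1 (input : Int) (full : List Int) : ∀ (l pre acc : List Int), pre ++ l = full →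
    ((List.range' pre.length l.length).foldl
      (fun r i => if full.getD i 0 = input then r ++ [(i : Int)] else r) acc)
    = acc ++ pvIdxs input l pre.length := by
  intro l
  induction l with
  | nil => simp [pvIdxs]
  | cons x xs ih =>
    intro pre acc hfull
    have hget : full.getD pre.length 0 = x := by
      rw [← hfull]; simp [List.getD]
    have hpre : (pre ++ [x]).length = pre.length + 1 := by simp
    have happ : (pre ++ [x]) ++ xs = full := by simpa using hfull
    rw [show (x :: xs).length = xs.length + 1 from rfl, List.range'_succ, List.foldl_cons, hget]
    by_cases h : x = input
    · have := ih (pre ++ [x]) (acc ++ [(pre.length : Int)]) happ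
      rw [hpre] at this
      rw [if_pos h, this]
      simp [pvIdxs, h]
    · have := ih (pre ++ [x]) acc happ
      rw [hpre] at this
      rw [if_neg h, this]
      simp [pvIdxs, h]

theorem pvA_loop2 : ∀ (l pre : List Int),
    ((List.range' pre.length l.length).foldl
      (fun r i => r.set i (r.getD i 0 - (i : Int))) (pre ++ l))
    = pre ++ pvAdj l pre.length := by
  intro l
  induction l with
  | nil => simp [pvAdj]
  | cons x xs ih =>
    intro pre
    have hget : (pre ++ x :: xs).getD pre.length 0 = x := by
      simp [List.getD]
    have hset : (pre ++ x :: xs).set pre.length (x - (pre.length : Int))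
        = (pre ++ [x - (pre.length : Int)]) ++ xs := by
      rw [List.set_append_right _ _ (le_refl pre.length)]
      simp
    have hpre : (pre ++ [x - (pre.length : Int)]).length = pre.length + 1 := by simp
    have := ih (pre ++ [x - (pre.length : Int)])
    rw [hpre] at this
    rw [show (x :: xs).length = xs.length + 1 from rfl, List.range'_succ, List.foldl_cons,
      hget, hset, this]
    simp [pvAdj]

theorem pvAdj_idxs (input : Int) : ∀ (l : List Int) (c k : Nat),
    pvAdj (pvIdxs input l (c + k)) k = pvF input l (c : Int) := by
  intro l
  induction l with
  | nil => simp [pvIdxs, pvAdj, pvF]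
  | cons x xs ih =>
    intro c k
    by_cases h : x = input
    · simp only [pvIdxs, if_pos h, pvAdj, pvF]
      rw [show c + k + 1 = c + (k + 1) from by omega, ih c (k + 1)]
      congr 1
      omega
    · simp only [pvIdxs, if_neg h, pvF]
      rw [show c + k + 1 = (c + 1) + k from by omega, ih (c + 1) k]
      norm_cast

-- ===== VERDICT (by name: the statement is the Claim_ definition above) =====
theorem rememberSpace_spec : Claim_equal_rememberSpace := by
  intro lis input _
  unfold Spec_rememberSpace
  have h1 := pvA_loop1 input lis lis [] [] (by simp)
  simp only [List.length_nil, List.nil_append] at h1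
  have h2 := pvA_loop2 (pvIdxs input lis 0) []
  simp only [List.length_nil, List.nil_append] at h2
  have h3 := pvAdj_idxs input lis 0 0
  simp only [Nat.zero_add, Nat.cast_zero] at h3
  have hA : rememberSpace lis input = pvF input lis 0 := by
    show (List.range ((List.range lis.length).foldl
        (fun r i => if lis.getD i 0 = input then r ++ [(i : Int)] else r) []).length).foldl
        (fun r i => r.set i (r.getD i 0 - (i : Int)))
        ((List.range lis.length).foldl
        (fun r i => if lis.getD i 0 = input then r ++ [(i : Int)] else r) []) = pvF input lis 0
    simp only [List.range_eq_range']
    simp only [h1]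
    rw [h2, h3]
  have hB : rememberSpace_alt lis input = pvF input lis 0 := by
    unfold rememberSpace_alt
    rw [pvB_foldl]
    simp
  rw [hA, hB]
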